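-- pv_equiv track=rewrite | github.com/dan-manolescu/online-judges | DMOJ/ccc18j3_are_we_there_yet.py | distances_for_city
-- ===== SOURCE A (Python) =====
-- def distances_for_city(distances, city):
-- 	'''
-- 	distances is a list of distances between each pair of cities.
-- 	city is the 0-based integer index of the city for which we
-- 	calculate the distance to all other cities.
--
-- 	Returns a list of distances from the city to all others ordered by city indexes
-- 	with string values
-- 	'''
-- 	output = [None] * (len(distances) + 1)
-- 	for i in range(len(output)):
-- 		if i == city:
-- 			output[i] = '0'
-- 		elif i < city:
-- 			output[i] = str(sum(distances[i:city]))
-- 		else: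
-- 			output[i] = str(sum(distances[city:i]))
-- 	return output
-- ===== SOURCE B (Python) =====
-- def distances_for_city(distances, city):
--     """One walk along the line: start with the distance from city 0 to `city`
--     (sum of the first `city` gaps), then sweep left to right, shrinking the
--     distance while approaching `city` and growing it after passing it."""
--     d = sum(distances[:city])
--     out = []
--     for i, gap in enumerate(distances):
--         out.append(str(d))
--         d = d - gap if i < city else d + gap
--     out.append(str(d))
--     return out
-- ===== Notes on version B (the rewrite author's own statement) =====
-- stated objective: faster
-- what changed: B makes one running-sum sweep along the line (subtract the gap before the city, add it after) instead of A's per-city slice-and-sum rescans; Pre_ excludes negative city values that Python's slice rules map inside the list (-len < city < 0), a corner where A's clamped-slice sums and B's walk are equally unspecified for an invalid 0-based city index.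
-- outside the precondition, e.g. on distances_for_city([3, 4], -1): A returns ['0', '0', '4'], B returns ['3', '6', '10']
import Mathlib
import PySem

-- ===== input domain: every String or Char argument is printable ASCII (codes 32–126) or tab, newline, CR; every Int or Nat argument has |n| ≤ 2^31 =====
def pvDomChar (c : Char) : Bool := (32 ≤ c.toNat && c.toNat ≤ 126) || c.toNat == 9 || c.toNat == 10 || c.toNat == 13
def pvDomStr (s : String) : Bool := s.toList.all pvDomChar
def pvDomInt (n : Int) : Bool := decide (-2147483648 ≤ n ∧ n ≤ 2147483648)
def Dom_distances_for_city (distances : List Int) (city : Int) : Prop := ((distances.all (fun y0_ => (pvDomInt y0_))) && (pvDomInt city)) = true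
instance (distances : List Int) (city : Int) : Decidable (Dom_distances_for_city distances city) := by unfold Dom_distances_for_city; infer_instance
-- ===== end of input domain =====

-- B replaces A's per-city slice-and-sum rescans (O(n^2)) by one running-sum walk along the line (O(n)).

-- ===== PORT A =====
-- A's write loop assigns output[i] exactly once, in index order, so it is ported as a map over range(len(output)).
def distances_for_city (distances : List Int) (city : Int) : List String :=
  (PySem.List.pyRange 0 ((distances.length : Int) + 1) 1).map (fun i =>
    if i == city then "0"
    else if i < city then PySem.Int.toStr (PySem.List.slice distances (some i) (some city)).sum
    else PySem.Int.toStr (PySem.List.slice distances (some city) (some i)).sum)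

-- ===== PORT B =====
def distances_for_city_alt (distances : List Int) (city : Int) : List String :=
  let d0 := (PySem.List.slice distances none (some city)).sum
  let p := (PySem.List.enumerate distances).foldl
      (fun (p : List String × Int) (ig : Int × Int) =>
        (p.1 ++ [PySem.Int.toStr p.2], if ig.1 < city then p.2 - ig.2 else p.2 + ig.2))
      ([], d0)
  p.1 ++ [PySem.Int.toStr p.2]

-- ===== PRECONDITION & SPEC =====
-- Pre_ excludes negative city values that Python's slice rules map inside the list
-- (-len < city < 0): city is documented as a 0-based index, and there A's clamped-slice
-- sums and B's walk give different, equally unspecified values.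
def Pre_distances_for_city (distances : List Int) (city : Int) : Prop :=
  0 ≤ city ∨ city + (distances.length : Int) ≤ 0
instance (distances : List Int) (city : Int) : Decidable (Pre_distances_for_city distances city) := by unfold Pre_distances_for_city; infer_instance
def pvWitness_distances_for_city : List Int × Int := ([4, 2, 7], 1)
def Spec_distances_for_city (distances : List Int) (city : Int) (out : List String) : Prop := out = distances_for_city_alt distances city
instance (distances : List Int) (city : Int) (out : List String) : Decidable (Spec_distances_for_city distances city out) := by unfold Spec_distances_for_city; infer_instance

-- ===== CLAIM (what is proved, stated in full; the proofs are below) =====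
def Claim_equal_distances_for_city : Prop := ∀ (distances : List Int) (city : Int), Dom_distances_for_city distances city → Pre_distances_for_city distances city → Spec_distances_for_city distances city (distances_for_city distances city)

-- ===== LEMMAS AND PROOFS =====

-- the numeric value A stringifies at position i (both slices are empty at i = city, giving 0)
def aVal (distances : List Int) (city : Int) (i : Int) : Int :=
  if i < city then (PySem.List.slice distances (some i) (some city)).sum
  else (PySem.List.slice distances (some city) (some i)).sum

-- the sum of a Python slice is a difference of two prefix sums at the clamped bounds.
theorem sum_slice_eq (xs : List Int) (a b : Int) :
    (PySem.List.slice xs (some a) (some b)).sum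
      = ((xs.take (PySem.List.clampIdx xs.length b)).sum : Int)
        - ((xs.take (min (PySem.List.clampIdx xs.length a) (PySem.List.clampIdx xs.length b))).sum : Int) := by
  set A := PySem.List.clampIdx xs.length a with hA
  set B := PySem.List.clampIdx xs.length b with hB
  show ((xs.drop A).take (B - A)).sum = _
  rw [← List.drop_take]
  have h : xs.take B = (xs.take B).take A ++ (xs.take B).drop A := (List.take_append_drop A _).symm
  have h3 := congrArg List.sum h
  rw [List.sum_append, List.take_take] at h3
  omega

-- B's fold over enumerate produces the map of any g satisfying B's update recurrence.
theorem fold_enum_spec (city : Int) (g : Int → Int) :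
    ∀ (xs : List Int) (k : Int) (acc : List String),
    (∀ j : Int, 0 ≤ j → j < (xs.length : Int) →
        g (k + j + 1) = if k + j < city then g (k + j) - xs.getD j.toNat 0 else g (k + j) + xs.getD j.toNat 0) →
    (PySem.List.enumerate xs k).foldl
      (fun (p : List String × Int) (ig : Int × Int) =>
        (p.1 ++ [PySem.Int.toStr p.2], if ig.1 < city then p.2 - ig.2 else p.2 + ig.2))
      (acc, g k)
    = (acc ++ (List.range xs.length).map (fun (j : Nat) => PySem.Int.toStr (g (k + (j : Int)))), g (k + xs.length)) := by
  intro xs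
  induction xs with
  | nil => intro k acc _; simp [PySem.List.enumerate_nil]
  | cons x rest ih =>
    intro k acc hrec
    have h0 : g (k + 1) = if k < city then g k - x else g k + x := by
      have := hrec 0 le_rfl (by exact_mod_cast Nat.succ_pos rest.length)
      simpa using this
    rw [PySem.List.enumerate_cons, List.foldl_cons]
    have hx : (if k < city then g k - x else g k + x) = g (k + 1) := h0.symm
    rw [hx, ih (k + 1) (acc ++ [PySem.Int.toStr (g k)]) ?_]
    · simp only [Prod.mk.injEq]
      refine ⟨?_, by rw [List.length_cons]; push_cast; ring_nf⟩
      rw [List.length_cons, List.range_succ_eq_map, List.map_cons, List.map_map,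
          List.append_assoc]
      rw [List.singleton_append]
      congr 1
      congr 1
      · norm_num
      · apply List.map_congr_left
        intro m _
        simp only [Function.comp_def]
        congr 2
        push_cast
        ring
    · intro j hj0 hj1
      have := hrec (j + 1) (by omega)
        (by simp only [List.length_cons, Nat.cast_add, Nat.cast_one]; omega)
      have ht : (j + 1).toNat = j.toNat + 1 := by omega
      rw [ht, List.getD_cons_succ] at this
      rw [show k + 1 + j = k + (j + 1) by ring]
      exact this

-- under Pre_, aVal satisfies B's recurrence and starts at B's d0.
theorem aVal_zero (distances : List Int) (city : Int) (h : Pre_distances_for_city distances city) :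
    aVal distances city 0 = (PySem.List.slice distances none (some city)).sum := by
  have h0 : PySem.List.clampIdx distances.length 0 = 0 := by
    simp only [PySem.List.clampIdx]; split_ifs <;> omega
  rw [← PySem.List.slice_zero_start]
  unfold aVal
  rcases lt_or_ge 0 city with hc | hc
  · rw [if_pos hc]
  · rw [if_neg (by omega), sum_slice_eq, sum_slice_eq, h0]
    rcases h with h | h
    · have : city = 0 := le_antisymm hc h
      subst this
      rw [h0]
    · have hcc : PySem.List.clampIdx distances.length city = 0 := by
        simp only [PySem.List.clampIdx]; split_ifs <;> omega
      rw [hcc]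

theorem aVal_step (distances : List Int) (city : Int) (h : Pre_distances_for_city distances city)
    (j : Int) (hj0 : 0 ≤ j) (hj1 : j < (distances.length : Int)) :
    aVal distances city (j + 1)
      = if j < city then aVal distances city j - distances.getD j.toNat 0
        else aVal distances city j + distances.getD j.toNat 0 := by
  have hjlt : j.toNat < distances.length := by omega
  have hxj : distances.getD j.toNat 0 = (distances.take (j.toNat + 1)).sum - (distances.take j.toNat).sum := by
    rw [List.sum_take_succ _ _ hjlt, List.getD_eq_getElem _ _ hjlt]
    ring
  have hcl : ∀ (i : Int), 0 ≤ i → i ≤ (distances.length : Int) →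
      PySem.List.clampIdx distances.length i = i.toNat := by
    intro i hi0 hi1; simp only [PySem.List.clampIdx]; split_ifs <;> omega
  have hj1' := hcl j hj0 (le_of_lt hj1)
  have hj2' := hcl (j + 1) (by omega) (by omega)
  have ht : (j + 1).toNat = j.toNat + 1 := by omega
  rw [ht] at hj2'
  unfold aVal
  rcases h with h | h
  · have hCv : ((PySem.List.clampIdx distances.length city : Nat) : Int)
        = min city (distances.length : Int) := by
      simp only [PySem.List.clampIdx]; split_ifs <;> omega
    split_ifs with h1 h2 h3
    · rw [sum_slice_eq, sum_slice_eq, hj1', hj2']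
      generalize PySem.List.clampIdx distances.length city = C at hCv ⊢
      rw [show min (j.toNat + 1) C = j.toNat + 1 from by omega,
          show min j.toNat C = j.toNat from by omega]
      linarith [hxj]
    · exact absurd (by omega : j < city) h2
    · -- here city = j + 1
      rw [sum_slice_eq, sum_slice_eq, hj1', hj2']
      generalize PySem.List.clampIdx distances.length city = C at hCv ⊢
      rw [show C = j.toNat + 1 from by omega, min_self,
          show min j.toNat (j.toNat + 1) = j.toNat from by omega]
      linarith [hxj]
    · rw [sum_slice_eq, sum_slice_eq, hj1', hj2']
      generalize PySem.List.clampIdx distances.length city = C at hCv ⊢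
      rw [show min C (j.toNat + 1) = C from by omega,
          show min C j.toNat = C from by omega]
      linarith [hxj]
  · have hC0 : PySem.List.clampIdx distances.length city = 0 := by
      simp only [PySem.List.clampIdx]; split_ifs <;> omega
    split_ifs with h1 h2 h3
    · exact absurd h1 (by omega)
    · exact absurd h1 (by omega)
    · exact absurd (by omega : ¬ j < city) (fun _ => by omega)
    · rw [sum_slice_eq, sum_slice_eq, hC0, hj1', hj2', Nat.zero_min, Nat.zero_min]
      simp only [List.take_zero, List.sum_nil]
      linarith [hxj]

theorem main_eq (distances : List Int) (city : Int) (h : Pre_distances_for_city distances city) :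
    distances_for_city distances city = distances_for_city_alt distances city := by
  have hstep := fold_enum_spec city (aVal distances city) distances 0 []
    (by intro j hj0 hj1; simpa using aVal_step distances city h j hj0 hj1)
  simp only [zero_add, List.nil_append] at hstep
  rw [aVal_zero distances city h] at hstep
  simp only [distances_for_city, distances_for_city_alt, hstep]
  rw [PySem.List.pyRange_one]
  have hlen : (((distances.length : Int) + 1 - 0).toNat) = distances.length + 1 := by omega
  rw [hlen, List.range_succ, List.map_append, List.map_append, List.map_map, List.map_map]
  congr 1
  · apply List.map_congr_left
    intro k hk
    rw [List.mem_range] at hk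
    simp only [Function.comp_def, zero_add]
    by_cases hkc : (k : Int) = city
    · rw [if_pos (by simpa using hkc)]
      have : aVal distances city k = 0 := by
        unfold aVal
        rw [← hkc, if_neg (by omega), sum_slice_eq, min_self]
        ring
      rw [this]; rfl
    · rw [if_neg (by simpa using hkc)]
      unfold aVal
      split_ifs <;> rfl
  · simp only [Function.comp_def, List.map_cons, List.map_nil, zero_add]
    by_cases hkc : ((distances.length : Nat) : Int) = city
    · rw [if_pos (by simpa using hkc)]
      have : aVal distances city distances.length = 0 := by
        unfold aVal
        rw [← hkc, if_neg (by omega), sum_slice_eq, min_self]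
        ring
      rw [this]; rfl
    · rw [if_neg (by simpa using hkc)]
      unfold aVal
      split_ifs <;> rfl

-- ===== VERDICT (by name: the statement is the Claim_ definition above) =====
theorem distances_for_city_spec : Claim_equal_distances_for_city := by
  intro distances city _ hpre
  unfold Spec_distances_for_city
  exact main_eq distances city hpre
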